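-- pv_equiv track=rewrite | github.com/salmanabuawad/solarica | backend/app/parsers/design/final_engine.py | detect_missing
-- ===== SOURCE A (Python) =====
-- def detect_missing(groups):
--     out = {}
--     for inv, nums in groups.items():
--         expected = set(range(1, max(nums)+1))
--         missing = sorted(expected - nums)
--         if missing:
--             out[inv] = missing
--     return out
-- ===== SOURCE B (Python) =====
-- def detect_missing(groups):
--     out = {}
--     for inv, nums in groups.items():
--         expected = 1
--         missing = []
--         for v in sorted(nums):
--             if v >= expected:
--                 missing.extend(range(expected, v))
--                 expected = v + 1
--         if missing:
--             out[inv] = missing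
--     return out
-- ===== Notes on version B (the rewrite author's own statement) =====
-- stated objective: alternative
-- what changed: B sorts each group's numbers and emits the gaps between consecutive present values in one scan with a running 'expected' counter, replacing A's full expected-set construction, per-element set difference and explicit sort of the result.
import Mathlib
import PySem

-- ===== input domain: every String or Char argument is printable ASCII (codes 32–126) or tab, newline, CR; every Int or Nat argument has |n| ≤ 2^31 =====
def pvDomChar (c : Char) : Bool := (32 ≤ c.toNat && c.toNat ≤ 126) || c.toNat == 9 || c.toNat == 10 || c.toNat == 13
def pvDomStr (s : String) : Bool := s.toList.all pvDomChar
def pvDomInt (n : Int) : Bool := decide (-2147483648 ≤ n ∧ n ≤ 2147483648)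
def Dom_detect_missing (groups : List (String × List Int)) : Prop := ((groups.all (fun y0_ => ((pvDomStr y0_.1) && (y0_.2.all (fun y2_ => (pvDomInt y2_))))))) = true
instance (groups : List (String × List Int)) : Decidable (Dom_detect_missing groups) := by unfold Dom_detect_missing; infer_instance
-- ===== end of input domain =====

-- B sorts each group's numbers and emits the gaps between consecutive present values in one
-- scan with a running 'expected' counter, replacing A's expected-set construction, set
-- difference and explicit sort (objective: alternative algorithm of similar cost).

-- ===== PORT A =====
-- max(nums); total form, used only under Pre_ (nums ≠ []) where it is Python's max
def pvMaxA (nums : List Int) : Int := ((PySem.List.max? nums (fun y => y)).getD 0)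

def pvBodyA (out : PySem.Dict String (List Int)) (p : String × List Int) : PySem.Dict String (List Int) :=
  let nums := p.2
  let expected : PySem.Set Int := PySem.Set.ofList (PySem.List.pyRange 1 (pvMaxA nums + 1))
  let missing := PySem.List.sorted (PySem.Set.diff expected nums) (fun y => y)
  if missing ≠ [] then out.insert p.1 missing else out

def detect_missing (groups : List (String × List Int)) : List (String × List Int) :=
  (groups.foldl pvBodyA PySem.Dict.empty).items

-- ===== PORT B =====
-- the body of B's inner loop: state = (expected, missing); 'missing.extend(range(expected, v))'
def pvGapStep (s : Int × List Int) (v : Int) : Int × List Int :=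
  if s.1 ≤ v then (v + 1, s.2 ++ PySem.List.pyRange s.1 v) else s

def pvBodyB (out : PySem.Dict String (List Int)) (p : String × List Int) : PySem.Dict String (List Int) :=
  let r := (PySem.List.sorted p.2 (fun y => y)).foldl pvGapStep (1, [])
  if r.2 ≠ [] then out.insert p.1 r.2 else out

def detect_missing_alt (groups : List (String × List Int)) : List (String × List Int) :=
  (groups.foldl pvBodyB PySem.Dict.empty).items

-- ===== PRECONDITION & SPEC =====
-- Pre_ excludes exactly the inputs where some group's set is empty: there Python A raises ValueError (max of empty set).
def Pre_detect_missing (groups : List (String × List Int)) : Prop :=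
  ∀ p ∈ groups, p.2 ≠ []
instance (groups : List (String × List Int)) : Decidable (Pre_detect_missing groups) := by unfold Pre_detect_missing; infer_instance

def pvWitness_detect_missing : (List (String × List Int)) := [("inv1", [1, 4, 2]), ("inv2", [1, 2])]

def Spec_detect_missing (groups : List (String × List Int)) (out : List (String × List Int)) : Prop := out = detect_missing_alt groups
instance (groups : List (String × List Int)) (out : List (String × List Int)) : Decidable (Spec_detect_missing groups out) := by unfold Spec_detect_missing; infer_instance

-- ===== CLAIM (what is proved, stated in full; the proofs are below) =====
def Claim_equal_detect_missing : Prop := ∀ (groups : List (String × List Int)), Dom_detect_missing groups → Pre_detect_missing groups → Spec_detect_missing groups (detect_missing groups)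
-- ===== LEMMAS AND PROOFS =====

-- The gap scan over a (≤-sorted) list collects exactly the absent numbers of range(e, e'),
-- where e' is the final 'expected'; e' bounds every element and is either e or a successor.
theorem pv_gap_spec (vals : List Int) (h : vals.Pairwise (· ≤ ·)) :
    ∀ (e : Int) (acc : List Int),
    ∃ e', e ≤ e' ∧
      vals.foldl pvGapStep (e, acc)
        = (e', acc ++ (PySem.List.pyRange e e').filter (fun i => decide (i ∉ vals))) ∧
      (∀ v ∈ vals, v < e') ∧
      (e' = e ∨ ∃ v ∈ vals, e' = v + 1) := by
  induction vals with
  | nil =>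
      intro e acc
      exact ⟨e, le_refl e, by
        simp [PySem.List.pyRange_one_eq_nil (le_refl e)], by simp, Or.inl rfl⟩
  | cons v rest ih =>
      rw [List.pairwise_cons] at h
      obtain ⟨hv, hrest⟩ := h
      intro e acc
      by_cases he : e ≤ v
      · obtain ⟨e', he', heq, hlt, hch⟩ := ih hrest (v + 1) (acc ++ PySem.List.pyRange e v)
        refine ⟨e', by omega, ?_, ?_, ?_⟩
        · have hstep : pvGapStep (e, acc) v = (v + 1, acc ++ PySem.List.pyRange e v) := by
            simp [pvGapStep, he]
          rw [List.foldl_cons, hstep, heq]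
          have hsplit1 : PySem.List.pyRange e e'
              = PySem.List.pyRange e (v+1) ++ PySem.List.pyRange (v+1) e' :=
            PySem.List.pyRange_one_append e (v+1) e' (by omega) he'
          have hsplit2 : PySem.List.pyRange e (v+1)
              = PySem.List.pyRange e v ++ [v] := PySem.List.pyRange_one_succ_right he
          rw [hsplit1, hsplit2]
          simp only [List.filter_append, List.append_assoc]
          congr 1
          have h1 : (PySem.List.pyRange e v).filter (fun i => decide (i ∉ v :: rest))
              = PySem.List.pyRange e v := by
            apply List.filter_eq_self.2
            intro i hi
            have := (PySem.List.mem_pyRange_one).1 hi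
            simp only [decide_eq_true_eq, List.mem_cons]
            rintro (rfl | hir)
            · omega
            · have := hv i hir; omega
          have h2 : ([v] : List Int).filter (fun i => decide (i ∉ v :: rest)) = [] := by
            simp
          have h3 : (PySem.List.pyRange (v+1) e').filter (fun i => decide (i ∉ v :: rest))
              = (PySem.List.pyRange (v+1) e').filter (fun i => decide (i ∉ rest)) := by
            apply List.filter_congr
            intro i hi
            have := (PySem.List.mem_pyRange_one).1 hi
            have hne' : i ≠ v := by omega
            simp [List.mem_cons, hne']
          rw [h1, h2, h3]
          simp
        · intro x hx
          rcases List.mem_cons.1 hx with rfl | hx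
          · omega
          · exact hlt x hx
        · right
          rcases hch with rfl | ⟨w, hw, rfl⟩
          · exact ⟨v, List.mem_cons_self, rfl⟩
          · exact ⟨w, List.mem_cons_of_mem _ hw, rfl⟩
      · obtain ⟨e', he', heq, hlt, hch⟩ := ih hrest e acc
        refine ⟨e', he', ?_, ?_, ?_⟩
        · have hstep : pvGapStep (e, acc) v = (e, acc) := by
            simp [pvGapStep, he]
          rw [List.foldl_cons, hstep, heq]
          congr 1
          congr 1
          apply List.filter_congr
          intro i hi
          have := (PySem.List.mem_pyRange_one).1 hi
          have hne' : i ≠ v := by omega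
          simp [List.mem_cons, hne']
        · intro x hx
          rcases List.mem_cons.1 hx with rfl | hx
          · omega
          · exact hlt x hx
        · rcases hch with rfl | ⟨w, hw, rfl⟩
          · exact Or.inl rfl
          · exact Or.inr ⟨w, List.mem_cons_of_mem _ hw, rfl⟩

-- per-group body of A: sorted(set(range(1,m+1)) - nums) is the filtered range
theorem pv_body_eq (m : Int) (nums : List Int) :
    PySem.List.sorted (PySem.Set.diff (PySem.Set.ofList (PySem.List.pyRange 1 (m + 1))) nums) (fun y => y)
      = (PySem.List.pyRange 1 (m + 1)).filter (fun i => !(PySem.Set.contains nums i)) := by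
  rw [PySem.Set.ofList_eq_self_of_nodup _ (PySem.List.nodup_pyRange_one 1 (m + 1))]
  show PySem.List.sorted ((PySem.List.pyRange 1 (m + 1)).filter _) (fun y => y) = _
  exact PySem.List.sorted_eq_self_of_pairwise _ _
    (((PySem.List.pairwise_lt_pyRange_one 1 (m + 1)).filter _).imp le_of_lt)

-- per-group equality: B's gap scan produces exactly A's missing list
theorem pv_group_eq (nums : List Int) (hne : nums ≠ []) :
    ((PySem.List.sorted nums (fun y => y)).foldl pvGapStep (1, ([] : List Int))).2
      = PySem.List.sorted (PySem.Set.diff (PySem.Set.ofList (PySem.List.pyRange 1 (pvMaxA nums + 1))) nums) (fun y => y) := by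
  rw [pv_body_eq]
  set vals := PySem.List.sorted nums (fun y => y) with hvals
  have hsorted : vals.Pairwise (· ≤ ·) := PySem.List.sorted_pairwise nums (fun y => y)
  have hmem : ∀ i : Int, i ∈ vals ↔ i ∈ nums := fun i => PySem.List.mem_sorted nums (fun y => y) false i
  obtain ⟨m, hm⟩ : ∃ m, PySem.List.max? nums (fun y => y) = some m := by
    cases hmx : PySem.List.max? nums (fun y => y) with
    | none => exact absurd ((PySem.List.max?_eq_none_iff nums (fun y => y)).1 hmx) hne
    | some m => exact ⟨m, rfl⟩
  have hmmem : m ∈ nums := PySem.List.max?_mem hm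
  have hmmax : ∀ y ∈ nums, y ≤ m := PySem.List.max?_isMax hm
  have hM : pvMaxA nums = m := by simp [pvMaxA, hm]
  obtain ⟨e', he1, heq, hlt, hch⟩ := pv_gap_spec vals hsorted 1 []
  rw [heq]
  simp only [List.nil_append]
  have hpred : ∀ xs : List Int, xs.filter (fun i => decide (i ∉ vals))
      = xs.filter (fun i => !(PySem.Set.contains nums i)) := by
    intro xs
    apply List.filter_congr
    intro i _
    simp [PySem.Set.contains, hmem i]
  rcases hch with rfl | ⟨v, hv, rfl⟩
  · -- e' = 1 : every element < 1, so both ranges are empty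
    have hm1 : m < 1 := hlt m ((hmem m).2 hmmem)
    rw [PySem.List.pyRange_one_eq_nil (le_refl 1),
        hM, PySem.List.pyRange_one_eq_nil (by omega : m + 1 ≤ 1)]
    simp
  · -- e' = v+1 with v ∈ vals : e' = max+1
    have hvm : v ≤ m := hmmax v ((hmem v).1 hv)
    have hme : m < v + 1 := hlt m ((hmem m).2 hmmem)
    have : v = m := by omega
    subst this
    rw [hM, hpred]

-- ===== VERDICT (by name: the statement is the Claim_ definition above) =====
-- the two fold bodies agree on nonempty groups
theorem pv_body_agree (d : PySem.Dict String (List Int)) (p : String × List Int) (hne : p.2 ≠ []) :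
    pvBodyA d p = pvBodyB d p := by
  simp only [pvBodyA, pvBodyB, pv_group_eq p.2 hne]

theorem pv_fold_eq (groups : List (String × List Int)) :
    ∀ d : PySem.Dict String (List Int), (∀ p ∈ groups, p.2 ≠ []) →
      groups.foldl pvBodyA d = groups.foldl pvBodyB d := by
  induction groups with
  | nil => intro d _; rfl
  | cons p rest ih =>
      intro d hpre
      simp only [List.foldl_cons]
      rw [pv_body_agree d p (hpre p List.mem_cons_self)]
      exact ih _ (fun q hq => hpre q (List.mem_cons_of_mem _ hq))

theorem detect_missing_spec : Claim_equal_detect_missing := by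
  intro groups _ hpre
  show detect_missing groups = detect_missing_alt groups
  unfold detect_missing detect_missing_alt
  rw [pv_fold_eq groups PySem.Dict.empty hpre]
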